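-- pv_equiv track=rewrite | github.com/bio-ontology-research-group/hapli | workflows/variant_calling/convert_haplotypes.py | map_position_to_chromosome
-- ===== SOURCE A (Python) =====
-- def map_position_to_chromosome(position, chrom_lengths):
--     """Map a position on concatenated reference to actual chromosome"""
--     cumulative_pos = 0
--     for chrom, length in chrom_lengths.items():
--         if position <= cumulative_pos + length:
--             # Position is in this chromosome
--             chrom_pos = position - cumulative_pos
--             return chrom, chrom_pos
--         cumulative_pos += length
--
--     # If we get here, position is beyond all chromosomes
--     # Return the last chromosome
--     if chrom_lengths:
--         last_chrom = list(chrom_lengths.keys())[-1]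
--         return last_chrom, position - (cumulative_pos - chrom_lengths[last_chrom])
--
--     return "chr1", position
-- ===== SOURCE B (Python) =====
-- def map_position_to_chromosome(position, chrom_lengths):
--     """Map a position on concatenated reference to actual chromosome"""
--     if not chrom_lengths:
--         return "chr1", position
--     keys = []
--     ends = []
--     total = 0
--     for chrom, length in chrom_lengths.items():
--         keys.append(chrom)
--         total += length
--         ends.append(total)
--     # binary search: first index i with position <= ends[i] (len(ends) if none)
--     lo, hi = 0, len(ends)
--     while lo < hi:
--         mid = (lo + hi) // 2
--         if ends[mid] < position:
--             lo = mid + 1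
--         else:
--             hi = mid
--     if lo == len(keys):
--         last = keys[-1]
--         return last, position - (total - chrom_lengths[last])
--     start = ends[lo - 1] if lo > 0 else 0
--     return keys[lo], position - start
-- ===== Notes on version B (the rewrite author's own statement) =====
-- stated objective: alternative
-- what changed: Replaces A's linear scan with running cumulative sum by building the prefix-sum 'end' boundaries once and locating the chromosome with a hand-written binary search (first index whose cumulative end >= position).
-- outside the precondition, e.g. on map_position_to_chromosome(3, {'a': 5, 'b': -10, 'c': 20}): A returns ('a', 3), B returns ('c', 8)
import Mathlib
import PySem

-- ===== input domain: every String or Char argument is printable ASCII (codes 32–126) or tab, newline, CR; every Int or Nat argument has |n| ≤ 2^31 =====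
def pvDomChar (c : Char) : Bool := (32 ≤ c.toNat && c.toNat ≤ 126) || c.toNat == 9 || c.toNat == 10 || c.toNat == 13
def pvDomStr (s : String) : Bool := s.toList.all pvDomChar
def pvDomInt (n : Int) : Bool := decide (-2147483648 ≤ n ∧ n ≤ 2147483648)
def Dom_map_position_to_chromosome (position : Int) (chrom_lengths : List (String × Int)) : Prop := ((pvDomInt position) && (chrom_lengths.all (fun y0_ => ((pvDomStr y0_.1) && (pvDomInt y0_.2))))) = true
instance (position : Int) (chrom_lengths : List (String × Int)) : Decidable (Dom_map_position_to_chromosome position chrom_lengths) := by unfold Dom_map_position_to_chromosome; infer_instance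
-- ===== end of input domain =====

-- B locates the chromosome via prefix-sum "end" boundaries and a hand-written binary search
-- instead of A's linear scan with a running cumulative sum (alternative decomposition, same results).


-- ===== PORT A =====
-- A's for-loop over chrom_lengths.items() with the running cumulative_pos, returning from inside the loop.
def mapA_loop (position : Int) : List (String × Int) → Int → Option (String × Int)
  | [], _ => none
  | (chrom, length) :: tl, cum =>
    if position ≤ cum + length then some (chrom, position - cum)
    else mapA_loop position tl (cum + length)

def map_position_to_chromosome (position : Int) (chrom_lengths : List (String × Int)) : String × Int :=
  match mapA_loop position chrom_lengths 0 with
  | some r => r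
  | none =>
    if chrom_lengths ≠ [] then
      -- cumulative_pos after the loop ran to completion
      let cumulative_pos := chrom_lengths.foldl (fun a p => a + p.2) 0
      -- list(chrom_lengths.keys())[-1]; the list is nonempty here so pyGetD is exact
      let last_chrom := PySem.List.pyGetD (chrom_lengths.map Prod.fst) (-1) ""
      (last_chrom, position - (cumulative_pos - (PySem.Dict.mk chrom_lengths).getD last_chrom 0))
    else ("chr1", position)

-- ===== PORT B =====
-- Source B's while-loop binary search: first index in [lo, hi) with position <= ends[i], else hi.
def bsearchB (ends : List Int) (position : Int) (lo hi : Nat) : Nat :=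
  if _h : lo < hi then
    let mid := (lo + hi) / 2
    if ends.getD mid 0 < position then bsearchB ends position (mid + 1) hi
    else bsearchB ends position lo mid
  else lo
termination_by hi - lo
decreasing_by all_goals omega

def map_position_to_chromosome_alt (position : Int) (chrom_lengths : List (String × Int)) : String × Int :=
  if chrom_lengths.isEmpty then ("chr1", position)
  else
    -- the single building loop: keys, prefix-sum ends, running total
    let st := chrom_lengths.foldl
      (fun (acc : List String × List Int × Int) p =>
        (acc.1 ++ [p.1], acc.2.1 ++ [acc.2.2 + p.2], acc.2.2 + p.2))
      ([], [], 0)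
    let keys := st.1
    let ends := st.2.1
    let total := st.2.2
    let lo := bsearchB ends position 0 ends.length
    if lo = keys.length then
      let last := PySem.List.pyGetD keys (-1) ""
      (last, position - (total - (PySem.Dict.mk chrom_lengths).getD last 0))
    else
      let start := if lo > 0 then ends.getD (lo - 1) 0 else 0
      (keys.getD lo "", position - start)

-- ===== PRECONDITION & SPEC =====
-- Pre_ excludes negative chromosome lengths after the first entry (the natural domain has no
-- negative lengths; the first length only shifts the start, so it is harmless): a negative later
-- length makes the cumulative end boundaries non-monotone, and which chromosome A's linear
-- first-match scan picks there is an accident of iteration order a binary search cannot share.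
def Pre_map_position_to_chromosome (position : Int) (chrom_lengths : List (String × Int)) : Prop :=
  ∀ p ∈ chrom_lengths.drop 1, 0 ≤ p.2
instance (position : Int) (chrom_lengths : List (String × Int)) : Decidable (Pre_map_position_to_chromosome position chrom_lengths) := by unfold Pre_map_position_to_chromosome; infer_instance

def pvWitness_map_position_to_chromosome : Int × (List (String × Int)) := (3, [("chr1", 10), ("chr2", 20)])

def Spec_map_position_to_chromosome (position : Int) (chrom_lengths : List (String × Int)) (out : String × Int) : Prop := out = map_position_to_chromosome_alt position chrom_lengths
instance (position : Int) (chrom_lengths : List (String × Int)) (out : String × Int) : Decidable (Spec_map_position_to_chromosome position chrom_lengths out) := by unfold Spec_map_position_to_chromosome; infer_instance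

-- ===== CLAIM (what is proved, stated in full; the proofs are below) =====
def Claim_equal_map_position_to_chromosome : Prop := ∀ (position : Int) (chrom_lengths : List (String × Int)), Dom_map_position_to_chromosome position chrom_lengths → Pre_map_position_to_chromosome position chrom_lengths → Spec_map_position_to_chromosome position chrom_lengths (map_position_to_chromosome position chrom_lengths)

-- ===== LEMMAS AND PROOFS =====

-- the prefix-sum "ends" list the building loop produces, starting from running total t
def pends : List (String × Int) → Int → List Int
  | [], _ => []
  | (_, n) :: tl, t => (t + n) :: pends tl (t + n)

theorem pends_length (l : List (String × Int)) (t : Int) : (pends l t).length = l.length := by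
  induction l generalizing t with
  | nil => rfl
  | cons p tl ih => cases p; simp [pends, ih]

theorem foldSt (l : List (String × Int)) (ks : List String) (es : List Int) (t : Int) :
    l.foldl (fun (acc : List String × List Int × Int) p =>
        (acc.1 ++ [p.1], acc.2.1 ++ [acc.2.2 + p.2], acc.2.2 + p.2)) (ks, es, t)
      = (ks ++ l.map Prod.fst, es ++ pends l t, t + (l.map Prod.snd).sum) := by
  induction l generalizing ks es t with
  | nil => simp [pends]
  | cons p tl ih => cases p with
    | mk c n => simp [List.foldl_cons, pends, ih, List.append_assoc]; ring

theorem foldA (l : List (String × Int)) (t : Int) :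
    l.foldl (fun a p => a + p.2) t = t + (l.map Prod.snd).sum := by
  induction l generalizing t with
  | nil => simp
  | cons p tl ih => simp [List.foldl_cons, ih]; ring

-- elements of pends are ≥ the starting total when lengths are nonnegative
theorem pends_ge (l : List (String × Int)) (t : Int) (h : ∀ p ∈ l, 0 ≤ p.2) :
    ∀ x ∈ pends l t, t ≤ x := by
  induction l generalizing t with
  | nil => simp [pends]
  | cons p tl ih =>
    cases p with
    | mk c n =>
      intro x hx
      have hn : 0 ≤ n := h (c, n) (by simp)
      simp [pends] at hx
      rcases hx with h1 | h2
      · omega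
      · have := ih (t + n) (fun q hq => h q (by simp [hq])) x h2; omega

theorem pends_pairwise (l : List (String × Int)) (t : Int) (h : ∀ p ∈ l.drop 1, 0 ≤ p.2) :
    (pends l t).Pairwise (· ≤ ·) := by
  induction l generalizing t with
  | nil => simp [pends]
  | cons p tl ih =>
    cases p with
    | mk c n =>
      simp only [pends, List.pairwise_cons]
      simp only [List.drop_one, List.tail_cons] at h
      exact ⟨pends_ge tl (t + n) h,
             ih (t + n) (fun q hq => h q (List.mem_of_mem_drop hq))⟩

theorem pends_mono (l : List (String × Int)) (t : Int) (h : ∀ p ∈ l.drop 1, 0 ≤ p.2)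
    {i j : Nat} (hij : i ≤ j) (hj : j < (pends l t).length) :
    (pends l t)[i]'(by omega) ≤ (pends l t)[j] := by
  rcases Nat.lt_or_ge i j with hlt | hge
  · exact (List.pairwise_iff_getElem.mp (pends_pairwise l t h)) i j (by omega) hj hlt
  · have : i = j := by omega
    subst this; exact le_refl _

-- characterization of the binary search on a monotone ends list
theorem bsearchB_char (ends : List Int) (position : Int)
    (hmono : ∀ i j : Nat, (hij : i ≤ j) → (hj : j < ends.length) → ends[i]'(by omega) ≤ ends[j])
    (lo hi : Nat) (hlh : lo ≤ hi) (hhl : hi ≤ ends.length)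
    (hlo : ∀ i : Nat, i < lo → (hi2 : i < ends.length) → ends[i] < position)
    (hhi : ∀ i : Nat, hi ≤ i → (hi2 : i < ends.length) → position ≤ ends[i]) :
    let r := bsearchB ends position lo hi
    (∀ i : Nat, i < r → (hi2 : i < ends.length) → ends[i] < position) ∧
      (∀ hr : r < ends.length, position ≤ ends[r]) ∧ r ≤ ends.length := by
  fun_induction bsearchB ends position lo hi with
  | case1 lo hi h mid hcmp ih =>
    apply ih (by omega) hhl
    · intro i hilt hile
      rcases Nat.lt_or_ge i lo with h1 | h2
      · exact hlo i h1 hile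
      · have hmid : mid < ends.length := by omega
        have := hmono i mid (by omega) hmid
        have : ends[i] ≤ ends[mid] := this
        simp only [List.getD_eq_getElem?_getD, List.getElem?_eq_getElem hmid] at hcmp
        simp at hcmp
        omega
    · exact hhi
  | case2 lo hi h mid hcmp ih =>
    apply ih (by omega) (by omega) hlo
    intro i hge hile
    have hmid : mid < ends.length := by omega
    simp only [List.getD_eq_getElem?_getD, List.getElem?_eq_getElem hmid] at hcmp
    simp at hcmp
    have := hmono mid i (by omega) hile
    omega
  | case3 lo hi h =>
    refine ⟨fun i hi1 hi2 => hlo i (by omega) hi2, fun hr => hhi lo (by omega) hr, by omega⟩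

-- A's loop, characterized by any index r with the first-crossing property over pends
theorem mapA_char (position : Int) (l : List (String × Int)) (t : Int) (r : Nat)
    (hr : r ≤ l.length)
    (hbelow : ∀ i : Nat, i < r → (hi2 : i < (pends l t).length) → (pends l t)[i] < position)
    (hat : ∀ hlt : r < (pends l t).length, position ≤ (pends l t)[r]) :
    mapA_loop position l t =
      if h : r < l.length then
        some ((l[r]).1, position - (if r = 0 then t else (pends l t)[r-1]'(by rw [pends_length]; omega)))
      else none := by
  induction l generalizing t r with
  | nil =>
    simp at hr; subst hr; simp [mapA_loop]
  | cons p tl ih =>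
    cases p with
    | mk c n =>
      have hplen : (pends ((c, n) :: tl) t).length = tl.length + 1 := by
        rw [pends_length]; simp
      by_cases hle : position ≤ t + n
      · -- the loop returns at the head; r must be 0
        have hr0 : r = 0 := by
          by_contra hne
          have h0 : (0 : Nat) < (pends ((c, n) :: tl) t).length := by omega
          have := hbelow 0 (by omega) h0
          simp [pends] at this
          omega
        subst hr0
        simp [mapA_loop, hle]
      · -- head skipped; r cannot be 0
        have hr0 : r ≠ 0 := by
          intro h0; subst h0
          have := hat (by omega)
          simp [pends] at this
          omega
        obtain ⟨r', rfl⟩ : ∃ r', r = r' + 1 := ⟨r - 1, by omega⟩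
        have step : mapA_loop position ((c, n) :: tl) t = mapA_loop position tl (t + n) := by
          simp [mapA_loop, hle]
        rw [step, ih (t + n) r' (by simp at hr; omega)
          (fun i hi hi2 => by
            have := hbelow (i + 1) (by omega) (by simp [pends]; rw [pends_length] at hi2 ⊢; omega)
            simpa [pends] using this)
          (fun hlt => by
            have := hat (by simp [pends]; rw [pends_length] at hlt ⊢; omega)
            simpa [pends] using this)]
        by_cases hlt : r' < tl.length
        · simp only [dif_pos hlt, dif_pos (show r' + 1 < ((c,n) :: tl).length by simp; omega)]
          congr 1
          simp only [List.getElem_cons_succ]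
          congr 1
          by_cases hz : r' = 0
          · subst hz; simp [pends]
          · simp only [if_neg hz, if_neg (show r' + 1 ≠ 0 by omega)]
            have : (pends ((c, n) :: tl) t)[r' + 1 - 1]'(by rw [pends_length]; simp; omega)
                = (pends tl (t + n))[r' - 1]'(by rw [pends_length]; omega) := by
              have hridx : r' + 1 - 1 = (r' - 1) + 1 := by omega
              simp only [pends, hridx, List.getElem_cons_succ]
            rw [this]
        · simp only [dif_neg hlt, dif_neg (show ¬ (r' + 1 < ((c,n) :: tl).length) by simp; omega)]

-- pends entries below index r equal the head/previous boundaries used by both programs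
theorem pends_getD (l : List (String × Int)) (t : Int) (k : Nat) (hk : k < l.length) :
    (pends l t).getD k 0 = (pends l t)[k]'(by rw [pends_length]; omega) := by
  rw [List.getD_eq_getElem?_getD, List.getElem?_eq_getElem (by rw [pends_length]; omega)]
  rfl

theorem keys_getD (l : List (String × Int)) (k : Nat) (hk : k < l.length) :
    (l.map Prod.fst).getD k "" = (l[k]).1 := by
  rw [List.getD_eq_getElem?_getD, List.getElem?_eq_getElem (by simp [hk])]
  simp

-- ===== VERDICT (by name: the statement is the Claim_ definition above) =====
theorem map_position_to_chromosome_spec : Claim_equal_map_position_to_chromosome := by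
  intro position l _hdom hpre
  unfold Spec_map_position_to_chromosome
  unfold map_position_to_chromosome map_position_to_chromosome_alt
  rcases List.eq_nil_or_concat' l with rfl | ⟨l', p, rfl⟩
  · simp [mapA_loop]
  · set L := l' ++ [p] with hL
    have hne : L ≠ [] := by simp [hL]
    have hnempty : L.isEmpty = false := by simp [hL]
    rw [foldSt L [] [] 0]
    simp only [List.nil_append, Int.zero_add, hnempty, Bool.false_eq_true, if_false]
    set ends := pends L 0 with hends
    have hlen : ends.length = L.length := by rw [hends, pends_length]
    have hmono : ∀ i j : Nat, (hij : i ≤ j) → (hj : j < ends.length) → ends[i]'(by omega) ≤ ends[j] :=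
      fun i j hij hj => pends_mono L 0 hpre hij hj
    set r := bsearchB ends position 0 ends.length with hrdef
    have hchar := bsearchB_char ends position hmono 0 ends.length (by omega) (le_refl _)
      (by omega) (by omega)
    obtain ⟨hbelow, hat, hrle⟩ := hchar
    have hA := mapA_char position L 0 r (by omega)
      (by rw [← hends]; exact hbelow) (by rw [← hends]; exact hat)
    rw [hA]
    by_cases hlt : r < L.length
    · -- in-range: both return the r-th chromosome with offset position - start
      simp only [dif_pos hlt]
      have hkl : ¬ (r = (L.map Prod.fst).length) := by simp; omega
      simp only [List.length_map] at hkl ⊢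
      rw [if_neg (by omega : ¬ r = L.length)]
      rw [keys_getD L r hlt]
      congr 1
      by_cases hz : r = 0
      · simp [hz]
      · rw [if_pos (by omega : r > 0), if_neg hz]
        rw [pends_getD L 0 (r - 1) (by omega)]
    · -- past the end: both take the last chromosome
      have hreq : r = L.length := by omega
      simp only [dif_neg hlt]
      rw [foldA L 0]
      simp only [List.length_map]
      rw [if_pos hreq, if_pos hne]
      simp
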